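-- pv_equiv track=rewrite | github.com/BlackLambda/ai-secretary | pipeline/prune_old_data.py | _sanitize_id_part
-- ===== SOURCE A (Python) =====
-- from typing import Any, Dict, List, Optional, Tuple
--
-- def _sanitize_id_part(raw: Any) -> str:
--     """Match server_react.py's stable card key sanitization."""
--     s = str(raw or "").strip()
--     if not s:
--         return "unknown"
--     s = "".join(ch if (ch.isalnum() or ch in "_-") else "-" for ch in s)
--     while "--" in s:
--         s = s.replace("--", "-")
--     s = s.strip("-")
--     return s[:120] if s else "unknown"
-- ===== SOURCE B (Python) =====
-- def _sanitize_id_part(raw) -> str: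
--     """Single forward pass: collapse dash runs while building, instead of
--     repeated replace("--","-") rescans."""
--     s = str(raw or "").strip()
--     if not s:
--         return "unknown"
--     out = []
--     prev_dash = False
--     for ch in s:
--         c = ch if (ch.isalnum() or ch in "_-") else "-"
--         if c == "-":
--             if not prev_dash:
--                 out.append("-")
--             prev_dash = True
--         else:
--             out.append(c)
--             prev_dash = False
--     result = "".join(out).strip("-")
--     return result[:120] if result else "unknown"
-- ===== Notes on version B (the rewrite author's own statement) =====
-- stated objective: alternative
-- what changed: Replaces A's map-then-repeated-replace collapse (rescanning the string until no double dash remains) with a single streaming pass that maps each char and appends a dash only when the previously appended char was not a dash, so dash runs collapse in one traversal.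
import Mathlib
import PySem

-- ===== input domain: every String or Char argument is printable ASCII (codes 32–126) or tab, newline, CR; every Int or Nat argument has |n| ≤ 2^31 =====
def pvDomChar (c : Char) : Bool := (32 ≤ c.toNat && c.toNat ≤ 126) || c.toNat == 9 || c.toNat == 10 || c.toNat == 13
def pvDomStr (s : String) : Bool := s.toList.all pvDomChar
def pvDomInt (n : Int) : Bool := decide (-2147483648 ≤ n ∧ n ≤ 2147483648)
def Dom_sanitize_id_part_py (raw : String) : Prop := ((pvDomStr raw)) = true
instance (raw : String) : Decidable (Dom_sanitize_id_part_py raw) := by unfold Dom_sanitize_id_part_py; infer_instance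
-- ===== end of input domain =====

-- B replaces A's repeated replace("--","-") rescans by one streaming pass with a prev-dash flag (objective: alternative).

-- ===== PORT A =====
-- proof-side normal form of one replace("--","-") pass (used by dashLoop's termination proof)
def rep2 : List Char → List Char
  | [] => []
  | [c] => [c]
  | c :: d :: t => if c = '-' && d = '-' then '-' :: rep2 t else c :: rep2 (d :: t)

theorem rep2_go_eq (fuel : Nat) : ∀ (l acc : List Char), l.length ≤ fuel →
    PySem.Chars.replace.go ['-', '-'] ['-'] fuel l acc = acc.reverse ++ rep2 l := by
  induction fuel with
  | zero =>
    intro l acc h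
    have : l = [] := List.eq_nil_of_length_eq_zero (Nat.le_zero.mp h)
    subst this; simp [PySem.Chars.replace.go, rep2]
  | succ n ih =>
    intro l acc h
    match l with
    | [] => simp [PySem.Chars.replace.go, rep2]
    | c :: t =>
      rw [PySem.Chars.replace.go]
      by_cases hp : List.isPrefixOf ['-', '-'] (c :: t) = true
      · rw [if_pos hp]
        match t, (by
            have := List.IsPrefix.length_le (List.isPrefixOf_iff_prefix.mp hp)
            simp at this
            omega : 1 ≤ t.length) with
        | d :: t', _ =>
          have hc : c = '-' ∧ d = '-' := by
            have := List.isPrefixOf_iff_prefix.mp hp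
            rcases this with ⟨r, hr⟩
            simp at hr
            exact ⟨hr.1.symm, hr.2.1.symm⟩
          obtain ⟨hc1, hc2⟩ := hc
          subst hc1; subst hc2
          simp only [List.length_cons] at h
          rw [show List.drop ['-', '-'].length ('-' :: '-' :: t') = t' by simp]
          rw [ih t' _ (by omega)]
          simp [rep2]
      · rw [if_neg hp]
        simp only [List.length_cons] at h
        rw [ih t _ (by omega)]
        match t with
        | [] => simp [rep2]
        | d :: t' =>
          have : ¬(c = '-' ∧ d = '-') := by
            intro ⟨h1, h2⟩
            subst h1; subst h2
            simp [List.isPrefixOf] at hp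
          simp only [rep2]
          rw [if_neg (by simp_all)]
          simp

theorem replace_eq_rep2 (l : List Char) : PySem.Chars.replace l ['-', '-'] ['-'] = rep2 l := by
  rw [PySem.Chars.replace]
  simp [rep2_go_eq l.length l [] (le_refl _)]

theorem length_rep2_le : ∀ (l : List Char), (rep2 l).length ≤ l.length := by
  intro l
  induction l using rep2.induct with
  | case1 => simp [rep2]
  | case2 c => simp [rep2]
  | case3 c d t htrue ih => rw [rep2, if_pos htrue]; simp; omega
  | case4 c d t hfalse ih => rw [rep2, if_neg hfalse]; simpa using ih

theorem length_rep2_lt : ∀ (l : List Char), ['-', '-'] <:+: l → (rep2 l).length < l.length := by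
  intro l
  induction l using rep2.induct with
  | case1 => intro h; exact absurd (List.IsInfix.length_le h) (by simp)
  | case2 c => intro h; exact absurd (List.IsInfix.length_le h) (by simp)
  | case3 c d t htrue ih =>
    intro _
    rw [rep2, if_pos htrue]
    have := length_rep2_le t
    simp; omega
  | case4 c d t hfalse ih =>
    intro h
    rw [rep2, if_neg hfalse]
    have htail : ['-', '-'] <:+: d :: t := by
      rcases (List.infix_cons_iff).mp h with hpre | htl
      · rcases hpre with ⟨r, hr⟩
        simp at hr
        exact absurd (by simp [hr.1.symm, hr.2.1.symm]) hfalse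
      · exact htl
    simpa using ih htail

-- literal port of A's 'while "--" in s: s = s.replace("--", "-")'
def dashLoop (s : List Char) : List Char :=
  if PySem.Chars.isIn ['-', '-'] s then dashLoop (PySem.Chars.replace s ['-', '-'] ['-']) else s
termination_by s.length
decreasing_by
  rw [replace_eq_rep2]
  exact length_rep2_lt s ((PySem.Chars.isIn_iff_infix _ _).mp (by assumption))

-- str(raw or "") on a string argument is raw itself; ch in "_-" for a single char is equality with '_' or '-';
-- "".join(ch if … else "-" for ch in s) is the per-char map
def sanitize_id_part_py (raw : String) : String :=
  let s := PySem.Chars.strip raw.toList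
  if s = [] then "unknown"
  else
    let s1 := s.map (fun ch => if PySem.Chars.isalnum ch || ch == '_' || ch == '-' then ch else '-')
    let s2 := dashLoop s1
    let s3 := PySem.Chars.stripChars s2 ['-']
    if s3 = [] then "unknown" else String.ofList (PySem.Chars.slice s3 none (some 120))

-- ===== PORT B =====
-- single pass: map each char, append '-' only when the previously appended char was not a dash
def sanitize_id_part_py_alt (raw : String) : String :=
  let s := PySem.Chars.strip raw.toList
  if s = [] then "unknown"
  else
    let st := s.foldl (fun (acc : List Char × Bool) ch =>
      let c := if PySem.Chars.isalnum ch || ch == '_' || ch == '-' then ch else '-'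
      if c == '-' then
        (if acc.2 then acc.1 else acc.1 ++ ['-'], true)
      else (acc.1 ++ [c], false)) ([], false)
    let r := PySem.Chars.stripChars st.1 ['-']
    if r = [] then "unknown" else String.ofList (PySem.Chars.slice r none (some 120))

-- ===== PRECONDITION & SPEC =====
def Spec_sanitize_id_part_py (raw : String) (out : String) : Prop := out = sanitize_id_part_py_alt raw
instance (raw : String) (out : String) : Decidable (Spec_sanitize_id_part_py raw out) := by unfold Spec_sanitize_id_part_py; infer_instance

-- ===== CLAIM (what is proved, stated in full; the proofs are below) =====
def Claim_equal_sanitize_id_part_py : Prop := ∀ (raw : String), Dom_sanitize_id_part_py raw → Spec_sanitize_id_part_py raw (sanitize_id_part_py raw)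

-- ===== LEMMAS AND PROOFS =====

-- the common collapsed form: runs of '-' become one '-'
def collapse : List Char → List Char
  | [] => []
  | [c] => [c]
  | c :: d :: t => if c = '-' && d = '-' then collapse (d :: t) else c :: collapse (d :: t)

theorem collapse_cons (c : Char) (xs : List Char) :
    collapse (c :: xs) = if c = '-' ∧ xs.head? = some '-' then collapse xs else c :: collapse xs := by
  match xs with
  | [] => simp [collapse]
  | d :: t =>
    by_cases h1 : c = '-' <;> by_cases h2 : d = '-' <;>
      simp [collapse, h1, h2]

theorem head?_rep2 : ∀ (l : List Char), (rep2 l).head? = l.head? := by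
  intro l
  induction l using rep2.induct with
  | case1 => simp [rep2]
  | case2 c => simp [rep2]
  | case3 c d t htrue ih =>
    rw [rep2, if_pos htrue]
    simp at htrue
    simp [htrue.1]
  | case4 c d t hfalse ih => rw [rep2, if_neg hfalse]; simp

theorem collapse_rep2 : ∀ (l : List Char), collapse (rep2 l) = collapse l := by
  intro l
  induction l using rep2.induct with
  | case1 => simp [rep2]
  | case2 c => simp [rep2]
  | case3 c d t htrue ih =>
    rw [rep2, if_pos htrue]
    simp at htrue
    obtain ⟨hc, hd⟩ := htrue
    subst hc; subst hd
    rw [collapse_cons, collapse_cons '-' ('-' :: t)]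
    simp [head?_rep2, ih]
    split <;> simp_all [collapse_cons]
  | case4 c d t hfalse ih =>
    rw [rep2, if_neg hfalse]
    rw [collapse_cons, collapse_cons c (d :: t)]
    rw [head?_rep2, ih]

theorem collapse_fixed : ∀ (l : List Char), ¬ (['-', '-'] <:+: l) → collapse l = l := by
  intro l
  induction l using collapse.induct with
  | case1 => simp [collapse]
  | case2 c => simp [collapse]
  | case3 c d t htrue ih =>
    intro h
    exfalso
    apply h
    simp at htrue
    exact ⟨[], t, by simp [htrue.1, htrue.2]⟩
  | case4 c d t hfalse ih =>
    intro h
    rw [collapse, if_neg hfalse, ih (fun htl => h (List.infix_cons_iff.mpr (Or.inr htl)))]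

theorem dashLoop_eq_collapse : ∀ (l : List Char), dashLoop l = collapse l := by
  intro l
  fun_induction dashLoop l with
  | case1 l hin ih =>
    rw [ih, replace_eq_rep2, collapse_rep2]
  | case2 l hin =>
    rw [collapse_fixed l (PySem.Chars.isIn_eq_false_iff _ _ |>.mp (by simpa using hin))]

-- B's streaming state, as a function of the remaining mapped characters
def cstep : Bool → List Char → List Char
  | _, [] => []
  | prev, c :: t => if c = '-' then (if prev then cstep true t else '-' :: cstep true t) else c :: cstep false t

theorem cstep_eq_collapse : ∀ (t : List Char), cstep false t = collapse t ∧ '-' :: cstep true t = collapse ('-' :: t) := by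
  intro t
  induction t with
  | nil => simp [cstep, collapse]
  | cons x t' ih =>
    constructor
    · by_cases hx : x = '-'
      · subst hx
        rw [cstep, if_pos rfl, if_neg (by simp)]
        exact ih.2
      · rw [cstep, if_neg hx, collapse_cons, if_neg (by simp [hx])]
        rw [ih.1]
    · by_cases hx : x = '-'
      · subst hx
        rw [cstep, if_pos rfl, if_pos rfl]
        rw [collapse_cons '-' ('-' :: t'), if_pos (by simp)]
        exact ih.2
      · rw [cstep, if_neg hx]
        rw [collapse_cons '-' (x :: t'), if_neg (by simp [hx])]
        rw [collapse_cons x t', if_neg (by simp [hx])]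
        rw [ih.1]

def mapf (ch : Char) : Char := if PySem.Chars.isalnum ch || ch == '_' || ch == '-' then ch else '-'

theorem foldlB_eq_cstep : ∀ (l : List Char) (acc : List Char) (prev : Bool),
    (l.foldl (fun (acc : List Char × Bool) ch =>
      let c := if PySem.Chars.isalnum ch || ch == '_' || ch == '-' then ch else '-'
      if c == '-' then
        (if acc.2 then acc.1 else acc.1 ++ ['-'], true)
      else (acc.1 ++ [c], false)) (acc, prev)).1 = acc ++ cstep prev (l.map mapf) := by
  intro l
  induction l with
  | nil => simp [cstep]
  | cons ch t ih =>
    intro acc prev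
    simp only [List.foldl_cons, List.map_cons]
    by_cases hc : mapf ch = '-'
    · have hb : ((if PySem.Chars.isalnum ch || ch == '_' || ch == '-' then ch else '-') == '-') = true := by
        simpa [mapf] using hc
      rw [if_pos hb, ih]
      simp only [cstep]
      rw [if_pos hc]
      cases prev <;> simp
    · have hb : ((if PySem.Chars.isalnum ch || ch == '_' || ch == '-' then ch else '-') == '-') = false :=
        beq_eq_false_iff_ne.mpr hc
      rw [if_neg (by rw [hb]; simp), ih]
      simp only [cstep]
      rw [if_neg hc]
      simp [mapf]

-- ===== VERDICT (by name: the statement is the Claim_ definition above) =====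
theorem sanitize_id_part_py_spec : Claim_equal_sanitize_id_part_py := by
  intro raw _
  unfold Spec_sanitize_id_part_py sanitize_id_part_py sanitize_id_part_py_alt
  by_cases hs : PySem.Chars.strip raw.toList = []
  · simp [hs]
  · simp only [hs]
    have key : ((PySem.Chars.strip raw.toList).foldl (fun (acc : List Char × Bool) ch =>
        let c := if PySem.Chars.isalnum ch || ch == '_' || ch == '-' then ch else '-'
        if c == '-' then
          (if acc.2 then acc.1 else acc.1 ++ ['-'], true)
        else (acc.1 ++ [c], false)) ([], false)).1 =
        dashLoop ((PySem.Chars.strip raw.toList).map (fun ch => if PySem.Chars.isalnum ch || ch == '_' || ch == '-' then ch else '-')) := by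
      rw [foldlB_eq_cstep]
      rw [dashLoop_eq_collapse]
      rw [(cstep_eq_collapse _).1]
      rfl
    rw [key]
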